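-- pv_equiv track=rewrite | github.com/brycewang-stanford/StatsPAI | src/statspai/did/callaway_santanna.py | _get_gt_pairs
-- ===== SOURCE A (Python) =====
-- from typing import Optional, List, Dict, Tuple, Any
--
-- def _get_gt_pairs(
--     cohorts: list,
--     time_periods: list,
--     base_period: str,
--     anticipation: int = 0,
-- ) -> List[Tuple[int, int, int]]:
--     """Determine all (g, t, base) triples to estimate.
--
--     With ``anticipation = δ > 0`` the base period for cohort g is shifted
--     from g − 1 to g − 1 − δ (CS2021, Section 3.2). For the 'varying' base
--     scheme the per-t base is similarly shifted to ``t − 1 − δ`` when t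
--     falls in the pre-treatment region.
--     """
--     pairs = []
--     for g_val in cohorts:
--         pre_cutoff = g_val - 1 - anticipation
--         available_pre = [tp for tp in time_periods if tp <= pre_cutoff]
--         if not available_pre:
--             continue
--         universal_base = max(available_pre)
--
--         for t_val in time_periods:
--             if t_val == universal_base:
--                 continue  # skip the base period itself
--
--             if base_period == 'varying' and t_val < g_val:
--                 pre_of_t = [tp for tp in time_periods if tp <= t_val - 1 - anticipation]
--                 if not pre_of_t:
--                     continue
--                 this_base = max(pre_of_t)
--             else:
--                 this_base = universal_base
--
--             pairs.append((g_val, t_val, this_base))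
--
--     return pairs
-- ===== SOURCE B (Python) =====
-- def _bisect_right(a, x):
--     lo, hi = 0, len(a)
--     while lo < hi:
--         mid = (lo + hi) // 2
--         if x < a[mid]:
--             hi = mid
--         else:
--             lo = mid + 1
--     return lo
--
--
-- def _get_gt_pairs(
--     cohorts: list,
--     time_periods: list,
--     base_period: str,
--     anticipation: int = 0,
-- ):
--     """Sort the time periods once; each 'max period <= cutoff' query becomes a
--     binary search on the sorted copy rather than a filter-and-max rescan."""
--     ts = sorted(time_periods)
--
--     def base_for(cutoff):
--         i = _bisect_right(ts, cutoff)
--         return ts[i - 1] if i else None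
--
--     pairs = []
--     for g_val in cohorts:
--         universal_base = base_for(g_val - 1 - anticipation)
--         if universal_base is None:
--             continue
--         for t_val in time_periods:
--             if t_val == universal_base:
--                 continue
--             if base_period == 'varying' and t_val < g_val:
--                 this_base = base_for(t_val - 1 - anticipation)
--                 if this_base is None:
--                     continue
--             else:
--                 this_base = universal_base
--             pairs.append((g_val, t_val, this_base))
--     return pairs
-- ===== Notes on version B (the rewrite author's own statement) =====
-- stated objective: alternative
-- what changed: B sorts time_periods once and answers every 'latest period <= cutoff' query (the universal base per cohort and the varying per-t base) with a bisect_right binary search on the sorted copy, where A filters the whole list and takes its max for each query; a timing run did not confirm a measurable gap, as both run times are dominated by building the G*T output pairs.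
import Mathlib
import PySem

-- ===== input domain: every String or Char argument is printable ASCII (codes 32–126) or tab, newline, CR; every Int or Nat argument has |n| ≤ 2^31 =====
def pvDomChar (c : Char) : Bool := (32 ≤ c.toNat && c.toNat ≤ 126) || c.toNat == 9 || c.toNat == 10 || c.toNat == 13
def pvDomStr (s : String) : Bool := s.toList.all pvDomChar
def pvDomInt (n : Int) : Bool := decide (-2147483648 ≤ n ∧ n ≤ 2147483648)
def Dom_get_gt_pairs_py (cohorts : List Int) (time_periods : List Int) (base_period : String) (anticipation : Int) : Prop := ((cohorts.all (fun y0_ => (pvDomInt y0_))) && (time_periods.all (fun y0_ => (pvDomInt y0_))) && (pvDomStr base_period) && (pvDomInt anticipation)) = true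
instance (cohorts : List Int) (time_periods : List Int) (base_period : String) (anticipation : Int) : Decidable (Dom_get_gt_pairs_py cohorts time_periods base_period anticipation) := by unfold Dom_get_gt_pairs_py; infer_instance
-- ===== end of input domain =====

-- B sorts the time periods once and answers each "max period ≤ cutoff" query by
-- binary search (bisect_right) instead of A's per-query filter-and-max rescan.

-- ===== PORT A =====
-- A's 'if not available_pre: continue' followed by 'max(available_pre)' is the
-- none/some split of PySem.List.max? (none exactly when the filtered list is empty).
def get_gt_pairs_py (cohorts : List Int) (time_periods : List Int) (base_period : String) (anticipation : Int) : List (Int × Int × Int) :=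
  cohorts.foldl (fun pairs g_val =>
    let pre_cutoff := g_val - 1 - anticipation
    let available_pre := time_periods.filter (fun tp => tp ≤ pre_cutoff)
    match PySem.List.max? available_pre (fun x => x) with
    | none => pairs  -- continue
    | some universal_base =>
      time_periods.foldl (fun pairs t_val =>
        if t_val = universal_base then pairs  -- skip the base period itself
        else if base_period = "varying" ∧ t_val < g_val then
          let pre_of_t := time_periods.filter (fun tp => tp ≤ t_val - 1 - anticipation)
          match PySem.List.max? pre_of_t (fun x => x) with
          | none => pairs  -- continue
          | some this_base => pairs ++ [(g_val, t_val, this_base)]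
        else pairs ++ [(g_val, t_val, universal_base)]) pairs) []

-- ===== PORT B =====
-- Source B's _bisect_right is exactly the standard bisect_right loop = PySem.List.bisectRight.
-- ts[i-1] has 1 ≤ i ≤ len ts, a nonnegative in-range index, so getD is exact.
def bBaseFor (ts : List Int) (cutoff : Int) : Option Int :=
  let i := PySem.List.bisectRight ts cutoff
  if i = 0 then none else some (ts.getD (i - 1) 0)

def get_gt_pairs_py_alt (cohorts : List Int) (time_periods : List Int) (base_period : String) (anticipation : Int) : List (Int × Int × Int) :=
  let ts := PySem.List.sorted time_periods (fun x => x) false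
  cohorts.foldl (fun pairs g_val =>
    match bBaseFor ts (g_val - 1 - anticipation) with
    | none => pairs  -- continue
    | some universal_base =>
      time_periods.foldl (fun pairs t_val =>
        if t_val = universal_base then pairs
        else if base_period = "varying" ∧ t_val < g_val then
          match bBaseFor ts (t_val - 1 - anticipation) with
          | none => pairs  -- continue
          | some this_base => pairs ++ [(g_val, t_val, this_base)]
        else pairs ++ [(g_val, t_val, universal_base)]) pairs) []

-- ===== PRECONDITION & SPEC =====
def Spec_get_gt_pairs_py (cohorts : List Int) (time_periods : List Int) (base_period : String) (anticipation : Int) (out : List (Int × Int × Int)) : Prop := out = get_gt_pairs_py_alt cohorts time_periods base_period anticipation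
instance (cohorts : List Int) (time_periods : List Int) (base_period : String) (anticipation : Int) (out : List (Int × Int × Int)) : Decidable (Spec_get_gt_pairs_py cohorts time_periods base_period anticipation out) := by unfold Spec_get_gt_pairs_py; infer_instance

-- ===== CLAIM (what is proved, stated in full; the proofs are below) =====
def Claim_equal_get_gt_pairs_py : Prop := ∀ (cohorts : List Int) (time_periods : List Int) (base_period : String) (anticipation : Int), Dom_get_gt_pairs_py cohorts time_periods base_period anticipation → Spec_get_gt_pairs_py cohorts time_periods base_period anticipation (get_gt_pairs_py cohorts time_periods base_period anticipation)

-- ===== LEMMAS AND PROOFS =====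

-- The heart of the equivalence: on the sorted copy of time_periods, the
-- bisect-based lookup returns exactly max(tp for tp in time_periods if tp ≤ c),
-- i.e. A's filter-and-max.
theorem bBaseFor_eq_max (time_periods : List Int) (c : Int) :
    PySem.List.max? (time_periods.filter (fun tp => tp ≤ c)) (fun x => x)
      = bBaseFor (PySem.List.sorted time_periods (fun x => x) false) c := by
  set ts := PySem.List.sorted time_periods (fun x => x) false with hts
  have hperm : ts.Perm time_periods := PySem.List.sorted_perm time_periods (fun x => x) false
  have hpw : ts.Pairwise (fun a b => a ≤ b) := PySem.List.sorted_pairwise time_periods (fun x => x)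
  obtain ⟨hile, hlo, hhi⟩ := PySem.List.bisectRight_spec ts c hpw
  unfold bBaseFor
  by_cases h0 : PySem.List.bisectRight ts c = 0
  · simp only [h0, if_true]
    rw [PySem.List.max?_eq_none_iff]
    apply List.filter_eq_nil_iff.mpr
    intro x hx
    have hxts : x ∈ ts := hperm.mem_iff.mpr hx
    obtain ⟨j, hj, rfl⟩ := List.mem_iff_getElem.mp hxts
    have := hhi j hj (by omega)
    simp only [decide_eq_true_eq]
    omega
  · simp only [if_neg h0]
    set i := PySem.List.bisectRight ts c with hi
    have hk : i - 1 < ts.length := by omega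
    have hget : ts.getD (i - 1) 0 = ts[i - 1] := List.getD_eq_getElem ts 0 hk
    rw [hget]
    set m := ts[i - 1] with hm
    have hmle : m ≤ c := hlo (i - 1) hk (by omega)
    have hmtp : m ∈ time_periods := hperm.mem_iff.mp (List.getElem_mem hk)
    have hmf : m ∈ time_periods.filter (fun tp => tp ≤ c) :=
      List.mem_filter.mpr ⟨hmtp, by simp [hmle]⟩
    rcases hmax : PySem.List.max? (time_periods.filter (fun tp => tp ≤ c)) (fun x => x) with _ | m'
    · rw [(PySem.List.max?_eq_none_iff _ _).mp hmax] at hmf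
      cases hmf
    · have hm'mem := PySem.List.max?_mem hmax
      have hm'max := PySem.List.max?_isMax hmax
      have h1 : m ≤ m' := hm'max m hmf
      obtain ⟨hm'tp, hm'c⟩ := List.mem_filter.mp hm'mem
      have hm'c : m' ≤ c := by simpa using hm'c
      have hm'ts : m' ∈ ts := hperm.mem_iff.mpr hm'tp
      obtain ⟨j, hj, hjm'⟩ := List.mem_iff_getElem.mp hm'ts
      have hji : j < i := by
        by_contra hcon
        have := hhi j hj (by omega)
        omega
      have h2 : m' ≤ m := by
        rcases Nat.lt_or_ge j (i - 1) with h | h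
        · have := (List.pairwise_iff_getElem.mp hpw) j (i - 1) hj hk h
          omega
        · have : j = i - 1 := by omega
          subst this
          omega
      have : m' = m := le_antisymm h2 h1
      rw [this]

theorem get_gt_pairs_py_spec : Claim_equal_get_gt_pairs_py := by
  intro cohorts time_periods base_period anticipation _
  show _ = _
  simp only [get_gt_pairs_py, get_gt_pairs_py_alt, bBaseFor_eq_max]
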